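-- pv_equiv track=rewrite | github.com/rapartlu/agent-hermitcraft | tools/season_recap.py | _extract_bullet_list
-- ===== SOURCE A (Python) =====
-- def _extract_bullet_list(text: str) -> list[str]:
--     """
--     Return a list of bullet point strings from a markdown section body.
--     Handles both ``- `` and ``* `` bullets, stripping leading marker.
--     Continuation lines (not starting with ``-``/``*``) are appended to the
--     previous item.
--     """
--     items: list[str] = []
--     for line in text.splitlines():
--         stripped = line.strip()
--         if stripped.startswith("- ") or stripped.startswith("* "):
--             items.append(stripped[2:].strip())
--         elif stripped and items:
--             # Continuation line — append to previous item
--             items[-1] = items[-1] + " " + stripped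
--     return items
-- ===== SOURCE B (Python) =====
-- def _extract_bullet_list(text: str) -> list[str]:
--     """Block decomposition: strip all lines up front, skip the pre-bullet
--     prefix, then split the line list at bullet boundaries into blocks and
--     render each block (bullet head + its non-empty continuation lines) with
--     a single join."""
--     lines = [ln.strip() for ln in text.splitlines()]
--
--     def is_bullet(ln: str) -> bool:
--         return ln.startswith("- ") or ln.startswith("* ")
--
--     n = len(lines)
--     i = 0
--     while i < n and not is_bullet(lines[i]):  # drop everything before 1st bullet
--         i += 1
--     items: list[str] = []
--     while i < n:
--         j = i + 1
--         while j < n and not is_bullet(lines[j]):  # end of this bullet's block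
--             j += 1
--         parts = [lines[i][2:].strip()] + [ln for ln in lines[i + 1:j] if ln]
--         items.append(" ".join(parts))
--         i = j
--     return items
-- ===== Notes on version B (the rewrite author's own statement) =====
-- stated objective: alternative
-- what changed: B strips all lines up front, drops the pre-bullet prefix, then partitions the line list into blocks at bullet boundaries and renders each block with one join, instead of A's single flat pass that mutates the last item string on every continuation line.
import Mathlib
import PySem

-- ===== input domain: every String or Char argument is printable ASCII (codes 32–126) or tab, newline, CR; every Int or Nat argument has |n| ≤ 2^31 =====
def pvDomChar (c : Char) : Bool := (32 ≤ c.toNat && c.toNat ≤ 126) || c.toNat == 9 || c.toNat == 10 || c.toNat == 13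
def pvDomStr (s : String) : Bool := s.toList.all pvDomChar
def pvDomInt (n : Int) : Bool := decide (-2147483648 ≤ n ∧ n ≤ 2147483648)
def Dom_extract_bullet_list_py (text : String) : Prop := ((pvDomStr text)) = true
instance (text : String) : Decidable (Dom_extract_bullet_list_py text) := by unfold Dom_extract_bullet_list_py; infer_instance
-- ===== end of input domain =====

-- B partitions the pre-stripped lines into blocks at bullet boundaries and joins each
-- block once, instead of A's single flat pass mutating the last item per continuation.

-- shared trivial predicate: stripped line opens a bullet
def pvIsBullet (s : String) : Bool :=
  PySem.Str.startswith s "- " || PySem.Str.startswith s "* "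

-- ===== PORT A =====
-- one iteration of A's loop over the lines
def pvStepA (items : List String) (line : String) : List String :=
  let stripped := PySem.Str.strip line
  if pvIsBullet stripped then
    items ++ [PySem.Str.strip (PySem.Str.slice stripped (some 2) none)]
  else if stripped ≠ "" then
    -- 'elif stripped and items: items[-1] = items[-1] + " " + stripped'
    match items.getLast? with
    | some last => items.dropLast ++ [last ++ " " ++ stripped]
    | none => items
  else items

def extract_bullet_list_py (text : String) : List String :=
  (PySem.Str.splitlines text).foldl pvStepA []

-- ===== PORT B =====
-- B's outer while loop: 'ls' is the suffix lines[i:], whose head Python guarantees is a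
-- bullet; the inner index scan to j computes the longest non-bullet run after the head,
-- which is exactly takeWhile/dropWhile on the suffix (exact).
def pvParse : List String → List String
  | [] => []
  | head :: rest =>
    PySem.Str.join " "
        (PySem.Str.strip (PySem.Str.slice head (some 2) none)
          :: ((rest.takeWhile (fun l => !pvIsBullet l)).filter (fun l => l ≠ "")))
      :: pvParse (rest.dropWhile (fun l => !pvIsBullet l))
termination_by ls => ls.length
decreasing_by
  have := List.length_dropWhile_le (fun l => !pvIsBullet l) rest
  simp
  omega

def extract_bullet_list_py_alt (text : String) : List String :=
  -- lines = [ln.strip() for ln in text.splitlines()]; first loop skips the prefix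
  pvParse (((PySem.Str.splitlines text).map PySem.Str.strip).dropWhile (fun l => !pvIsBullet l))

-- ===== PRECONDITION & SPEC =====
def Spec_extract_bullet_list_py (text : String) (out : List String) : Prop := out = extract_bullet_list_py_alt text
instance (text : String) (out : List String) : Decidable (Spec_extract_bullet_list_py text out) := by unfold Spec_extract_bullet_list_py; infer_instance

-- ===== CLAIM (what is proved, stated in full; the proofs are below) =====
def Claim_equal_extract_bullet_list_py : Prop := ∀ (text : String), Dom_extract_bullet_list_py text → Spec_extract_bullet_list_py text (extract_bullet_list_py text)

-- ===== LEMMAS AND PROOFS =====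

-- A's step expressed on an already-stripped line (pvStepA line = pvStepA' (strip line))
def pvStepA' (items : List String) (s : String) : List String :=
  if pvIsBullet s then
    items ++ [PySem.Str.strip (PySem.Str.slice s (some 2) none)]
  else if s ≠ "" then
    match items.getLast? with
    | some last => items.dropLast ++ [last ++ " " ++ s]
    | none => items
  else items

theorem pvStepA'_ne (items : List String) (s : String) (h : items ≠ []) :
    pvStepA' items s ≠ [] := by
  unfold pvStepA'
  split_ifs with h1 h2
  · simp
  · cases hg : items.getLast? with
    | none => simpa
    | some last => simp
  · simpa

theorem pvStepA'_prefix (acc items : List String) (s : String) (h : items ≠ []) :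
    pvStepA' (acc ++ items) s = acc ++ pvStepA' items s := by
  unfold pvStepA'
  split_ifs with h1 h2
  · simp
  · rw [List.getLast?_append_of_ne_nil acc h]
    cases hg : items.getLast? with
    | none => exact absurd (List.getLast?_eq_none_iff.1 hg) h
    | some last => simp [List.dropLast_append_of_ne_nil h]
  · rfl

theorem pv_foldl_prefix (ls : List String) (acc items : List String) (h : items ≠ []) :
    ls.foldl pvStepA' (acc ++ items) = acc ++ ls.foldl pvStepA' items := by
  induction ls generalizing items with
  | nil => rfl
  | cons l ls ih =>
    simp only [List.foldl_cons, pvStepA'_prefix acc items l h]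
    exact ih _ (pvStepA'_ne items l h)

-- join " " over a nonempty list peels its head
theorem pv_join_cons (a : String) (rest : List String) (h : rest ≠ []) :
    PySem.Str.join " " (a :: rest) = a ++ " " ++ PySem.Str.join " " rest := by
  apply String.toList_injective
  cases rest with
  | nil => exact absurd rfl h
  | cons b bs => simp [PySem.Str.toList_join, PySem.Chars.join_cons_cons]

theorem pv_join_singleton (x : String) : PySem.Str.join " " [x] = x := by
  apply String.toList_injective
  simp [PySem.Str.toList_join, PySem.Chars.join_singleton]

-- join " " (cur :: parts) is the left fold of ' ++ " " ++ '
theorem pv_join_foldl (parts : List String) (cur : String) :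
    PySem.Str.join " " (cur :: parts)
      = parts.foldl (fun c l => c ++ " " ++ l) cur := by
  induction parts generalizing cur with
  | nil => simpa using pv_join_singleton cur
  | cons p ps ih =>
    cases ps with
    | nil => simp [pv_join_cons cur [p] (by simp), pv_join_singleton]
    | cons q qs =>
      rw [pv_join_cons cur (p :: q :: qs) (by simp), pv_join_cons p (q :: qs) (by simp),
        List.foldl_cons, ← ih (cur ++ " " ++ p),
        pv_join_cons (cur ++ " " ++ p) (q :: qs) (by simp)]
      simp [String.append_assoc]

-- folding A's step over a run of non-bullet lines concatenates the non-empty ones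
theorem pv_foldl_block (block : List String) (cur : String)
    (hb : ∀ l ∈ block, pvIsBullet l = false) :
    block.foldl pvStepA' [cur]
      = [(block.filter (fun l => l ≠ "")).foldl (fun c l => c ++ " " ++ l) cur] := by
  induction block generalizing cur with
  | nil => rfl
  | cons l ls ih =>
    have hl : pvIsBullet l = false := hb l (by simp)
    by_cases he : l = ""
    · simp only [List.foldl_cons, List.filter_cons]
      simpa [pvStepA', hl, he] using ih cur (fun x hx => hb x (by simp [hx]))
    · simp only [List.foldl_cons, List.filter_cons]
      have : pvStepA' [cur] l = [cur ++ " " ++ l] := by simp [pvStepA', hl, he]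
      simpa [this, he] using ih (cur ++ " " ++ l) (fun x hx => hb x (by simp [hx]))

theorem pv_head_dropWhile {p : String → Bool} {l : List String} {x : String} {xs : List String}
    (h : l.dropWhile p = x :: xs) : p x = false := by
  induction l with
  | nil => simp at h
  | cons a as ih =>
    by_cases hp : p a = true
    · exact ih (by simpa [List.dropWhile_cons, hp] using h)
    · rw [List.dropWhile_cons] at h
      simp [hp] at h
      simp [← h.1]; simpa using hp

-- main invariant: from a bullet head, A's fold appends exactly B's blocks
theorem pvG : ∀ (n : Nat) (ls : List String), ls.length ≤ n → ∀ (acc : List String),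
    (∀ x xs, ls = x :: xs → pvIsBullet x = true) →
    ls.foldl pvStepA' acc = acc ++ pvParse ls := by
  intro n
  induction n with
  | zero =>
    intro ls hl acc _
    have : ls = [] := List.eq_nil_of_length_eq_zero (Nat.le_zero.mp hl)
    simp [this, pvParse]
  | succ n ih =>
    intro ls hl acc hh
    cases ls with
    | nil => simp [pvParse]
    | cons head rest =>
      have hb : pvIsBullet head = true := hh head rest rfl
      have hsplit : rest = rest.takeWhile (fun l => !pvIsBullet l)
          ++ rest.dropWhile (fun l => !pvIsBullet l) :=
        (List.takeWhile_append_dropWhile).symm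
      have hblock : ∀ l ∈ rest.takeWhile (fun l => !pvIsBullet l), pvIsBullet l = false := by
        intro l hlm
        simpa using List.mem_takeWhile_imp hlm
      have htail_len : (rest.dropWhile (fun l => !pvIsBullet l)).length ≤ n := by
        have := List.length_dropWhile_le (fun l => !pvIsBullet l) rest
        simp at hl; omega
      have htail_head : ∀ x xs, rest.dropWhile (fun l => !pvIsBullet l) = x :: xs →
          pvIsBullet x = true := by
        intro x xs hx
        have := pv_head_dropWhile (p := fun l => !pvIsBullet l) hx
        simpa using this
      have hstep : pvStepA' acc head
          = acc ++ [PySem.Str.strip (PySem.Str.slice head (some 2) none)] := by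
        simp [pvStepA', hb]
      conv_lhs => rw [List.foldl_cons, hstep, hsplit]
      rw [List.foldl_append,
        pv_foldl_prefix _ acc [_] (by simp),
        pv_foldl_block _ _ hblock,
        pv_foldl_prefix _ acc [_] (by simp),
        ih _ htail_len _ htail_head,
        pvParse]
      simp [pv_join_foldl]

-- skipping the pre-bullet prefix: A's fold from [] ignores non-bullet lines
theorem pvP (ls : List String) :
    ls.foldl pvStepA' [] = pvParse (ls.dropWhile (fun l => !pvIsBullet l)) := by
  induction ls with
  | nil => simp [pvParse]
  | cons l rest ih =>
    cases hl : pvIsBullet l with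
    | true =>
      rw [List.dropWhile_cons]
      simp only [hl, Bool.not_true]
      rw [if_neg (by simp)]
      exact (pvG (l :: rest).length (l :: rest) le_rfl []
        (fun x xs hx => by cases hx; simpa using hl)).trans (by simp)
    | false =>
      have hstep : pvStepA' [] l = [] := by
        unfold pvStepA'
        simp [hl]
      rw [List.foldl_cons, hstep, ih, List.dropWhile_cons]
      simp [hl]

-- ===== VERDICT (by name: the statement is the Claim_ definition above) =====
theorem extract_bullet_list_py_spec : Claim_equal_extract_bullet_list_py := by
  intro text _
  show extract_bullet_list_py text = extract_bullet_list_py_alt text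
  unfold extract_bullet_list_py extract_bullet_list_py_alt
  rw [show pvStepA = fun items line => pvStepA' items (PySem.Str.strip line) from rfl,
    ← List.foldl_map, pvP]
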